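-- pv_equiv track=rewrite | github.com/rafaelmdc/homorepeat | apps/browser/stats/taxonomy_gutter.py | _first_preserved_descendants
-- ===== SOURCE A (Python) =====
-- def _first_preserved_descendants(raw_nodes, taxon_id: int, preserved_taxon_ids):
--     if taxon_id in preserved_taxon_ids:
--         return [taxon_id]
--
--     preserved_descendants = []
--     for child_taxon_id in raw_nodes[taxon_id]["orderedChildTaxonIds"]:
--         preserved_descendants.extend(
--             _first_preserved_descendants(raw_nodes, child_taxon_id, preserved_taxon_ids)
--         )
--     return preserved_descendants
-- ===== SOURCE B (Python) =====
-- def _first_preserved_descendants(raw_nodes, taxon_id: int, preserved_taxon_ids):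
--     # Iterative DFS with an explicit stack instead of recursion.
--     result = []
--     stack = [taxon_id]
--     while stack:
--         node = stack.pop()
--         if node in preserved_taxon_ids:
--             result.append(node)
--         else:
--             # children pushed reversed so they are processed left-to-right
--             stack.extend(reversed(raw_nodes[node]["orderedChildTaxonIds"]))
--     return result
-- ===== Notes on version B (the rewrite author's own statement) =====
-- stated objective: alternative
-- what changed: Replaces the recursive preorder collection (list-extend of recursive results per child) by an iterative DFS over an explicit stack seeded with the root, popping one node at a time and pushing children reversed.
import Mathlib
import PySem

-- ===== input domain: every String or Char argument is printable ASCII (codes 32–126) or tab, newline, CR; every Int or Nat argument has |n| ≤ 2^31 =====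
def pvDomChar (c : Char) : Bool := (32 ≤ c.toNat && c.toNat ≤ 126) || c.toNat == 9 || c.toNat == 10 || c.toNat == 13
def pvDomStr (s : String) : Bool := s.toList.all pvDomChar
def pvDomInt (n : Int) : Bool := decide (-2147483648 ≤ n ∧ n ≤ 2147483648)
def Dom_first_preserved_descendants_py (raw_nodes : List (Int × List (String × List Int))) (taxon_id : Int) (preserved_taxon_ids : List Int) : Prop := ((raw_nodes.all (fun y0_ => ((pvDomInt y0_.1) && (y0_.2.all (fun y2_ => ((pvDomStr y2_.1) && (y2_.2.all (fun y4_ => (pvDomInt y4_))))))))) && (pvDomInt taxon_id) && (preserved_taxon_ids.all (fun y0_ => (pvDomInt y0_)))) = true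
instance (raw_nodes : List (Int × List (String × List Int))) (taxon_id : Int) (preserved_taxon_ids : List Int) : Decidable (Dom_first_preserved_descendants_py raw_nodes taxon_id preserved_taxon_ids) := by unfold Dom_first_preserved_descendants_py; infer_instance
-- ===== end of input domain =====

-- B replaces A's recursive preorder collection by an iterative DFS over an explicit stack
-- (alternative decomposition, no speed claim); return values agree on Pre_.

-- ===== PORT A =====
-- raw_nodes[t]["orderedChildTaxonIds"]: both dict lookups are first-match on the association
-- list; 'none' marks Python's KeyError (those inputs are excluded by Pre_).
def pvChildList (raw_nodes : List (Int × List (String × List Int))) (t : Int) : Option (List Int) :=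
  match List.lookup t raw_nodes with
  | none => none
  | some d => List.lookup "orderedChildTaxonIds" d

-- A's recursion, totalized with a depth-fuel guard (raw_nodes.length + 1 levels; under Pre_
-- the call tree is acyclic with all non-preserved nodes distinct keys, so the fuel never runs out).
def pvFpdA (raw_nodes : List (Int × List (String × List Int))) (pres : List Int) : Nat → Int → List Int
  | 0, t => if t ∈ pres then [t] else []          -- fuel sentinel, unreachable under Pre_
  | f + 1, t =>
    if t ∈ pres then [t]
    else
      match pvChildList raw_nodes t with
      | none => []                                 -- KeyError, excluded by Pre_
      | some cs => cs.foldl (fun acc c => acc ++ pvFpdA raw_nodes pres f c) []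

def first_preserved_descendants_py (raw_nodes : List (Int × List (String × List Int))) (taxon_id : Int) (preserved_taxon_ids : List Int) : List Int :=
  pvFpdA raw_nodes preserved_taxon_ids (raw_nodes.length + 1) taxon_id

-- ===== PORT B =====
-- bound on any node's children-list length, used only to size B's totalizing fuel
def pvMaxBranch (raw_nodes : List (Int × List (String × List Int))) : Nat :=
  raw_nodes.foldl (fun m p => max m ((List.lookup "orderedChildTaxonIds" p.2).getD []).length) 0

-- the while-loop over the explicit stack (head = top; Python's 'extend(reversed(children))'
-- on a pop-from-the-end stack is 'children ++ stack' here), totalized with a fuel guard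
def pvLoopB (raw_nodes : List (Int × List (String × List Int))) (pres : List Int) : Nat → List Int → List Int → List Int
  | _, [], acc => acc
  | 0, _ :: _, acc => acc                          -- fuel sentinel, unreachable under Pre_
  | g + 1, t :: stk, acc =>
    if t ∈ pres then pvLoopB raw_nodes pres g stk (acc ++ [t])
    else pvLoopB raw_nodes pres g ((pvChildList raw_nodes t).getD [] ++ stk) acc

def first_preserved_descendants_py_alt (raw_nodes : List (Int × List (String × List Int))) (taxon_id : Int) (preserved_taxon_ids : List Int) : List Int :=
  pvLoopB raw_nodes preserved_taxon_ids ((pvMaxBranch raw_nodes + 1) ^ (raw_nodes.length + 1)) [taxon_id] []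

-- ===== PRECONDITION & SPEC =====
-- the children A would iterate over at a node: none for a preserved node (A returns [t]
-- without touching raw_nodes), else the looked-up list (empty stands for KeyError, which
-- Pre_ rules out separately)
def pvSuccs (raw_nodes : List (Int × List (String × List Int))) (pres : List Int) (t : Int) : List Int :=
  if t ∈ pres then [] else (pvChildList raw_nodes t).getD []

-- append the elements of xs not already present (ordered dedup union)
def pvGrow (S xs : List Int) : List Int :=
  xs.foldl (fun s x => if x ∈ s then s else s ++ [x]) S

def pvStep (raw_nodes : List (Int × List (String × List Int))) (pres : List Int) (S : List Int) : List Int :=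
  pvGrow S (S.flatMap (pvSuccs raw_nodes pres))

def pvClos (raw_nodes : List (Int × List (String × List Int))) (pres : List Int) : Nat → List Int → List Int
  | 0, S => S
  | n + 1, S => pvClos raw_nodes pres n (pvStep raw_nodes pres S)

-- all ints occurring in any children list of raw_nodes (an upper bound for what closure can add)
def pvKidsBound (raw_nodes : List (Int × List (String × List Int))) : Nat :=
  (raw_nodes.flatMap (fun p => p.2.flatMap (fun q => q.2))).length

-- the set of nodes A's recursion visits starting from the nodes of seed (enough closure
-- steps to reach the fixpoint)
def pvReach (raw_nodes : List (Int × List (String × List Int))) (pres : List Int) (seed : List Int) : List Int :=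
  pvClos raw_nodes pres (seed.length + pvKidsBound raw_nodes + 1) seed

-- Pre_ excludes exactly the inputs on which A raises: a KeyError (some node reachable from
-- taxon_id through non-preserved nodes is missing from raw_nodes or lacks the
-- "orderedChildTaxonIds" key) or unbounded recursion (a reachable non-preserved node lies on
-- a cycle, RecursionError).  'A returns' is inherently a reachability property, so Pre_ is a
-- membership condition over pvReach, the reflexive-transitive closure of the INPUT's
-- child-edge relation (a set, order-free) — it runs neither port's algorithm (both compute an
-- ordered preorder list and stop on fuel).
def Pre_first_preserved_descendants_py (raw_nodes : List (Int × List (String × List Int))) (taxon_id : Int) (preserved_taxon_ids : List Int) : Prop :=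
  taxon_id ∈ preserved_taxon_ids ∨
  (∀ n ∈ pvReach raw_nodes preserved_taxon_ids [taxon_id], n ∉ preserved_taxon_ids →
     (pvChildList raw_nodes n).isSome = true ∧
     n ∉ pvReach raw_nodes preserved_taxon_ids (pvGrow [] (pvSuccs raw_nodes preserved_taxon_ids n)))
instance (raw_nodes : List (Int × List (String × List Int))) (taxon_id : Int) (preserved_taxon_ids : List Int) : Decidable (Pre_first_preserved_descendants_py raw_nodes taxon_id preserved_taxon_ids) := by unfold Pre_first_preserved_descendants_py; infer_instance

def pvWitness_first_preserved_descendants_py : (List (Int × List (String × List Int))) × Int × List Int :=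
  ([(0, [("orderedChildTaxonIds", [1, 2])]), (1, [("orderedChildTaxonIds", [])]),
    (2, [("orderedChildTaxonIds", [3])]), (3, [("orderedChildTaxonIds", [])])], 0, [1, 3])

def Spec_first_preserved_descendants_py (raw_nodes : List (Int × List (String × List Int))) (taxon_id : Int) (preserved_taxon_ids : List Int) (out : List Int) : Prop := out = first_preserved_descendants_py_alt raw_nodes taxon_id preserved_taxon_ids
instance (raw_nodes : List (Int × List (String × List Int))) (taxon_id : Int) (preserved_taxon_ids : List Int) (out : List Int) : Decidable (Spec_first_preserved_descendants_py raw_nodes taxon_id preserved_taxon_ids out) := by unfold Spec_first_preserved_descendants_py; infer_instance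

-- ===== CLAIM (what is proved, stated in full; the proofs are below) =====
def Claim_equal_first_preserved_descendants_py : Prop := ∀ (raw_nodes : List (Int × List (String × List Int))) (taxon_id : Int) (preserved_taxon_ids : List Int), Dom_first_preserved_descendants_py raw_nodes taxon_id preserved_taxon_ids → Pre_first_preserved_descendants_py raw_nodes taxon_id preserved_taxon_ids → Spec_first_preserved_descendants_py raw_nodes taxon_id preserved_taxon_ids (first_preserved_descendants_py raw_nodes taxon_id preserved_taxon_ids)

-- ===== LEMMAS AND PROOFS =====

-- "A's fueled recursion never hits its sentinel below t at this fuel"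
def pvOkA (raw_nodes : List (Int × List (String × List Int))) (pres : List Int) : Nat → Int → Bool
  | 0, t => decide (t ∈ pres)
  | f + 1, t =>
    decide (t ∈ pres) ||
      match pvChildList raw_nodes t with
      | none => false
      | some cs => cs.all (pvOkA raw_nodes pres f)

-- number of stack pops B spends on t (= size of A's unfolded call tree at this fuel)
def pvCostA (raw_nodes : List (Int × List (String × List Int))) (pres : List Int) : Nat → Int → Nat
  | 0, _ => 1
  | f + 1, t =>
    if t ∈ pres then 1
    else
      match pvChildList raw_nodes t with
      | none => 1
      | some cs => 1 + (cs.map (pvCostA raw_nodes pres f)).sum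

-- a reach set is closed under taking A's children
def pvClosed (raw_nodes : List (Int × List (String × List Int))) (pres : List Int) (T : List Int) : Prop :=
  ∀ x ∈ T, ∀ c ∈ pvSuccs raw_nodes pres x, c ∈ T

-- the measure that makes A's recursion terminate on Pre_: how many distinct non-preserved
-- nodes its recursion from t visits
def pvMu (raw_nodes : List (Int × List (String × List Int))) (pres : List Int) (t : Int) : Nat :=
  (pvReach raw_nodes pres [t]).countP (fun n => decide (n ∉ pres))

-- equation lemmas (rewriting with the raw definitions unfolds nested matches; these keep goals tidy)
theorem pvFpdA_pres (rn : List (Int × List (String × List Int))) (pres : List Int)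
    (f : Nat) (t : Int) (h : t ∈ pres) : pvFpdA rn pres f t = [t] := by
  cases f <;> simp [pvFpdA, h]

theorem pvFpdA_succ_some (rn : List (Int × List (String × List Int))) (pres : List Int)
    (f : Nat) (t : Int) (cs : List Int) (hnp : t ∉ pres) (hch : pvChildList rn t = some cs) :
    pvFpdA rn pres (f + 1) t = cs.flatMap (pvFpdA rn pres f) := by
  simp only [pvFpdA, if_neg hnp, hch]
  rw [PySem.List.foldl_append_eq_flatMap]
  simp

theorem pvOkA_succ_true_iff (rn : List (Int × List (String × List Int))) (pres : List Int)
    (f : Nat) (t : Int) :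
    pvOkA rn pres (f + 1) t = true ↔
      (t ∈ pres ∨ ∃ cs, pvChildList rn t = some cs ∧ ∀ c ∈ cs, pvOkA rn pres f c = true) := by
  cases hch : pvChildList rn t with
  | none => simp [pvOkA, hch]
  | some cs => simp [pvOkA, hch, List.all_eq_true]

theorem pvOkA_of_mem_pres (rn : List (Int × List (String × List Int))) (pres : List Int)
    (f : Nat) (t : Int) (h : t ∈ pres) : pvOkA rn pres f t = true := by
  cases f with
  | zero => simp [pvOkA, h]
  | succ f => rw [pvOkA_succ_true_iff]; exact Or.inl h

theorem pvCostA_zero (rn : List (Int × List (String × List Int))) (pres : List Int)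
    (t : Int) : pvCostA rn pres 0 t = 1 := rfl

theorem pvCostA_succ_pres (rn : List (Int × List (String × List Int))) (pres : List Int)
    (f : Nat) (t : Int) (h : t ∈ pres) : pvCostA rn pres (f + 1) t = 1 := by
  simp [pvCostA, h]

theorem pvCostA_succ_none (rn : List (Int × List (String × List Int))) (pres : List Int)
    (f : Nat) (t : Int) (hnp : t ∉ pres) (hch : pvChildList rn t = none) :
    pvCostA rn pres (f + 1) t = 1 := by
  simp [pvCostA, hnp, hch]

theorem pvCostA_succ_some (rn : List (Int × List (String × List Int))) (pres : List Int)
    (f : Nat) (t : Int) (cs : List Int) (hnp : t ∉ pres) (hch : pvChildList rn t = some cs) :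
    pvCostA rn pres (f + 1) t = 1 + (cs.map (pvCostA rn pres f)).sum := by
  simp [pvCostA, hnp, hch]

theorem pvLoopB_nil (rn : List (Int × List (String × List Int))) (pres : List Int)
    (g : Nat) (acc : List Int) : pvLoopB rn pres g [] acc = acc := by
  cases g <;> rfl

theorem pvLoopB_succ_pres (rn : List (Int × List (String × List Int))) (pres : List Int)
    (g : Nat) (t : Int) (stk acc : List Int) (h : t ∈ pres) :
    pvLoopB rn pres (g + 1) (t :: stk) acc = pvLoopB rn pres g stk (acc ++ [t]) := by
  simp [pvLoopB, h]

theorem pvLoopB_succ_not (rn : List (Int × List (String × List Int))) (pres : List Int)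
    (g : Nat) (t : Int) (stk acc : List Int) (h : t ∉ pres) :
    pvLoopB rn pres (g + 1) (t :: stk) acc =
      pvLoopB rn pres g ((pvChildList rn t).getD [] ++ stk) acc := by
  simp [pvLoopB, h]

theorem pv_lookup_mem {α β : Type} [BEq α] [LawfulBEq α] :
    ∀ (l : List (α × β)) (a : α) (b : β), List.lookup a l = some b → (a, b) ∈ l := by
  intro l
  induction l with
  | nil => intro a b h; simp [List.lookup] at h
  | cons p l ih =>
    intro a b h
    rw [List.lookup] at h
    cases he : a == p.1 with
    | true =>
      rw [he] at h
      cases h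
      have : a = p.1 := eq_of_beq he
      cases p
      simp_all
    | false =>
      rw [he] at h
      simp only at h
      exact List.mem_cons_of_mem _ (ih a b h)

-- ---- closure toolbox ----

theorem pv_mem_grow (S xs : List Int) (y : Int) :
    y ∈ pvGrow S xs ↔ y ∈ S ∨ y ∈ xs := by
  induction xs generalizing S with
  | nil => simp [pvGrow]
  | cons x xs ih =>
    unfold pvGrow
    simp only [List.foldl_cons]
    by_cases hx : x ∈ S
    · rw [if_pos hx]
      rw [show (xs.foldl (fun s x => if x ∈ s then s else s ++ [x]) S) = pvGrow S xs from rfl, ih]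
      constructor
      · rintro (h | h)
        · exact Or.inl h
        · exact Or.inr (List.mem_cons_of_mem _ h)
      · rintro (h | h)
        · exact Or.inl h
        · rcases List.mem_cons.mp h with rfl | h
          · exact Or.inl hx
          · exact Or.inr h
    · rw [if_neg hx]
      rw [show (xs.foldl (fun s x => if x ∈ s then s else s ++ [x]) (S ++ [x])) = pvGrow (S ++ [x]) xs from rfl, ih]
      simp only [List.mem_append, List.mem_cons]
      tauto

theorem pv_grow_eq_append (S xs : List Int) : ∃ r, pvGrow S xs = S ++ r := by
  induction xs generalizing S with
  | nil => exact ⟨[], by simp [pvGrow]⟩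
  | cons x xs ih =>
    unfold pvGrow
    simp only [List.foldl_cons]
    by_cases hx : x ∈ S
    · rw [if_pos hx]; exact ih S
    · rw [if_neg hx]
      obtain ⟨r, hr⟩ := ih (S ++ [x])
      exact ⟨[x] ++ r, by rw [show (xs.foldl (fun s x => if x ∈ s then s else s ++ [x]) (S ++ [x])) = pvGrow (S ++ [x]) xs from rfl, hr, List.append_assoc]⟩

theorem pv_nodup_grow (S xs : List Int) (h : S.Nodup) : (pvGrow S xs).Nodup := by
  induction xs generalizing S with
  | nil => simpa [pvGrow] using h
  | cons x xs ih =>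
    unfold pvGrow
    simp only [List.foldl_cons]
    by_cases hx : x ∈ S
    · rw [if_pos hx]; exact ih S h
    · rw [if_neg hx]
      refine ih (S ++ [x]) ?_
      rw [List.nodup_append]
      refine ⟨h, List.nodup_singleton x, ?_⟩
      intro a ha b hb
      rw [List.mem_singleton] at hb
      subst hb
      exact fun he => hx (he ▸ ha)

theorem pv_subset_step (rn : List (Int × List (String × List Int))) (pres : List Int)
    (S : List Int) : S ⊆ pvStep rn pres S := by
  obtain ⟨r, hr⟩ := pv_grow_eq_append S (S.flatMap (pvSuccs rn pres))
  unfold pvStep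
  rw [hr]
  exact List.subset_append_left _ _

theorem pv_subset_clos (rn : List (Int × List (String × List Int))) (pres : List Int) :
    ∀ (n : Nat) (S : List Int), S ⊆ pvClos rn pres n S := by
  intro n
  induction n with
  | zero => intro S; simp [pvClos]
  | succ n ih =>
    intro S
    exact (pv_subset_step rn pres S).trans (by simpa [pvClos] using ih (pvStep rn pres S))

theorem pv_nodup_clos (rn : List (Int × List (String × List Int))) (pres : List Int) :
    ∀ (n : Nat) (S : List Int), S.Nodup → (pvClos rn pres n S).Nodup := by
  intro n
  induction n with
  | zero => intro S h; simpa [pvClos] using h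
  | succ n ih => intro S h; exact ih _ (pv_nodup_grow _ _ h)

theorem pv_clos_subset_of_closed (rn : List (Int × List (String × List Int))) (pres : List Int)
    (T : List Int) (hT : pvClosed rn pres T) :
    ∀ (n : Nat) (S : List Int), S ⊆ T → pvClos rn pres n S ⊆ T := by
  intro n
  induction n with
  | zero => intro S h; simpa [pvClos] using h
  | succ n ih =>
    intro S h
    apply ih
    intro y hy
    rcases (pv_mem_grow _ _ y).mp hy with hy | hy
    · exact h hy
    · obtain ⟨x, hx, hyx⟩ := List.mem_flatMap.mp hy
      exact hT x (h hx) y hyx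

theorem pv_closed_of_step_eq (rn : List (Int × List (String × List Int))) (pres : List Int)
    (S : List Int) (h : pvStep rn pres S = S) : pvClosed rn pres S := by
  intro x hx c hc
  have : c ∈ pvStep rn pres S := by
    apply (pv_mem_grow _ _ c).mpr
    exact Or.inr (List.mem_flatMap.mpr ⟨x, hx, hc⟩)
  rwa [h] at this

theorem pv_clos_of_step_eq (rn : List (Int × List (String × List Int))) (pres : List Int)
    (S : List Int) (h : pvStep rn pres S = S) : ∀ n, pvClos rn pres n S = S := by
  intro n
  induction n with
  | zero => rfl
  | succ n ih => simp only [pvClos, h, ih]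

theorem pv_clos_closed_or_long (rn : List (Int × List (String × List Int))) (pres : List Int) :
    ∀ (n : Nat) (S : List Int),
      pvClosed rn pres (pvClos rn pres n S) ∨ S.length + n ≤ (pvClos rn pres n S).length := by
  intro n
  induction n with
  | zero => intro S; exact Or.inr (by simp [pvClos])
  | succ n ih =>
    intro S
    by_cases h : pvStep rn pres S = S
    · left
      rw [show pvClos rn pres (n+1) S = pvClos rn pres n (pvStep rn pres S) from rfl, h,
        pv_clos_of_step_eq rn pres S h]
      exact pv_closed_of_step_eq rn pres S h
    · obtain ⟨r, hr⟩ := pv_grow_eq_append S (S.flatMap (pvSuccs rn pres))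
      have hstep : pvStep rn pres S = S ++ r := hr
      have hrne : r ≠ [] := by
        intro hre; apply h; rw [hstep, hre, List.append_nil]
      have hlen : S.length + 1 ≤ (pvStep rn pres S).length := by
        rw [hstep, List.length_append]
        have : 1 ≤ r.length := List.length_pos_iff.mpr hrne
        omega
      rcases ih (pvStep rn pres S) with hc | hl
      · exact Or.inl hc
      · right
        rw [show pvClos rn pres (n+1) S = pvClos rn pres n (pvStep rn pres S) from rfl]
        omega

-- any node's A-children all occur among the ints of raw_nodes' children lists
theorem pv_succs_subset_kids (rn : List (Int × List (String × List Int))) (pres : List Int)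
    (t : Int) : pvSuccs rn pres t ⊆ rn.flatMap (fun p => p.2.flatMap (fun q => q.2)) := by
  unfold pvSuccs
  by_cases hp : t ∈ pres
  · simp [hp]
  · rw [if_neg hp]
    cases hch : pvChildList rn t with
    | none => simp
    | some cs =>
      simp only [Option.getD_some]
      unfold pvChildList at hch
      cases hlk : List.lookup t rn with
      | none => rw [hlk] at hch; cases hch
      | some d =>
        rw [hlk] at hch
        intro c hc
        apply List.mem_flatMap.mpr
        exact ⟨(t, d), pv_lookup_mem rn t d hlk,
          List.mem_flatMap.mpr ⟨("orderedChildTaxonIds", cs), pv_lookup_mem d _ cs hch, hc⟩⟩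

-- S ++ (all children ints) is a closed superset of any closure of S
theorem pv_clos_subset_big (rn : List (Int × List (String × List Int))) (pres : List Int)
    (n : Nat) (S : List Int) :
    pvClos rn pres n S ⊆ S ++ rn.flatMap (fun p => p.2.flatMap (fun q => q.2)) := by
  apply pv_clos_subset_of_closed
  · intro x _ c hc
    exact List.mem_append_right _ (pv_succs_subset_kids rn pres x hc)
  · exact List.subset_append_left _ _

theorem pv_nodup_subset_length {L M : List Int} (h : L.Nodup) (hs : L ⊆ M) :
    L.length ≤ M.length := by
  calc L.length = L.toFinset.card := (List.toFinset_card_of_nodup h).symm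
    _ ≤ M.toFinset.card := Finset.card_le_card (fun x hx => List.mem_toFinset.mpr (hs (List.mem_toFinset.mp hx)))
    _ ≤ M.length := List.toFinset_card_le M

theorem pv_reach_closed (rn : List (Int × List (String × List Int))) (pres : List Int)
    (seed : List Int) (hs : seed.Nodup) : pvClosed rn pres (pvReach rn pres seed) := by
  rcases pv_clos_closed_or_long rn pres (seed.length + pvKidsBound rn + 1) seed with h | h
  · exact h
  · exfalso
    have hsub := pv_clos_subset_big rn pres (seed.length + pvKidsBound rn + 1) seed
    have hnd := pv_nodup_clos rn pres (seed.length + pvKidsBound rn + 1) seed hs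
    have hle := pv_nodup_subset_length hnd hsub
    rw [List.length_append] at hle
    have hK : (rn.flatMap (fun p => p.2.flatMap (fun q => q.2))).length = pvKidsBound rn := rfl
    rw [hK] at hle
    omega

theorem pv_seed_subset_reach (rn : List (Int × List (String × List Int))) (pres : List Int)
    (seed : List Int) : seed ⊆ pvReach rn pres seed :=
  pv_subset_clos rn pres _ seed

theorem pv_reach_subset_of_closed (rn : List (Int × List (String × List Int))) (pres : List Int)
    (T seed : List Int) (hT : pvClosed rn pres T) (h : seed ⊆ T) :
    pvReach rn pres seed ⊆ T :=
  pv_clos_subset_of_closed rn pres T hT _ seed h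

-- strict countP decrease: L ⊆ M nodup lists, x ∈ M \ L with p x
theorem pv_countP_lt {L M : List Int} {p : Int → Bool} {x : Int}
    (hL : L.Nodup) (hM : M.Nodup) (hs : L ⊆ M) (hxM : x ∈ M) (hxL : x ∉ L) (hp : p x = true) :
    L.countP p < M.countP p := by
  rw [List.countP_eq_length_filter, List.countP_eq_length_filter]
  have h1 : (L.filter p).toFinset.card = (L.filter p).length :=
    List.toFinset_card_of_nodup (hL.filter p)
  have h2 : (M.filter p).toFinset.card = (M.filter p).length :=
    List.toFinset_card_of_nodup (hM.filter p)
  rw [← h1, ← h2]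
  apply Finset.card_lt_card
  constructor
  · intro y hy
    rw [List.mem_toFinset, List.mem_filter] at hy ⊢
    exact ⟨hs hy.1, hy.2⟩
  · intro hcon
    have := hcon (List.mem_toFinset.mpr (List.mem_filter.mpr ⟨hxM, hp⟩))
    rw [List.mem_toFinset, List.mem_filter] at this
    exact hxL this.1

-- children of a reachable non-preserved node: measure strictly decreases
theorem pv_mu_lt (rn : List (Int × List (String × List Int))) (pres : List Int)
    (t c : Int) (hnp : t ∉ pres) (hc : c ∈ pvSuccs rn pres t)
    (hacy : t ∉ pvReach rn pres (pvGrow [] (pvSuccs rn pres t))) :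
    pvMu rn pres c < pvMu rn pres t := by
  have hRt_closed : pvClosed rn pres (pvReach rn pres [t]) :=
    pv_reach_closed rn pres [t] (List.nodup_singleton t)
  have htRt : t ∈ pvReach rn pres [t] :=
    pv_seed_subset_reach rn pres [t] (List.mem_singleton_self t)
  have hcRt : c ∈ pvReach rn pres [t] := hRt_closed t htRt c hc
  -- Rc ⊆ Rt
  have hsub : pvReach rn pres [c] ⊆ pvReach rn pres [t] :=
    pv_reach_subset_of_closed rn pres _ [c] hRt_closed
      (by intro y hy; rcases List.mem_singleton.mp hy with rfl; exact hcRt)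
  -- t ∉ Rc, via the acyclicity closure seeded with t's children
  have hAt_closed : pvClosed rn pres (pvReach rn pres (pvGrow [] (pvSuccs rn pres t))) :=
    pv_reach_closed rn pres _ (pv_nodup_grow [] _ List.nodup_nil)
  have hcAt : c ∈ pvGrow [] (pvSuccs rn pres t) := (pv_mem_grow [] _ c).mpr (Or.inr hc)
  have htRc : t ∉ pvReach rn pres [c] := by
    intro hcon
    apply hacy
    exact pv_reach_subset_of_closed rn pres _ [c] hAt_closed
      (by intro y hy; rcases List.mem_singleton.mp hy with rfl;
          exact pv_seed_subset_reach rn pres _ hcAt) hcon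
  exact pv_countP_lt
    (pv_nodup_clos rn pres _ [c] (List.nodup_singleton c))
    (pv_nodup_clos rn pres _ [t] (List.nodup_singleton t))
    hsub htRt htRc (by simpa using hnp)

theorem pv_mu_pos (rn : List (Int × List (String × List Int))) (pres : List Int)
    (t : Int) (hnp : t ∉ pres) : 1 ≤ pvMu rn pres t := by
  apply List.countP_pos_iff.mpr
  exact ⟨t, pv_seed_subset_reach rn pres [t] (List.mem_singleton_self t), by simpa using hnp⟩

-- fuel adequacy for A's recursion under Pre_
theorem pvOkA_of_pre (rn : List (Int × List (String × List Int))) (pres : List Int)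
    (R : List Int) (hRc : pvClosed rn pres R)
    (hpre : ∀ n ∈ R, n ∉ pres →
      (pvChildList rn n).isSome = true ∧
      n ∉ pvReach rn pres (pvGrow [] (pvSuccs rn pres n))) :
    ∀ (f : Nat) (t : Int), t ∈ R → pvMu rn pres t ≤ f + 1 → pvOkA rn pres (f + 1) t = true := by
  intro f
  induction f with
  | zero =>
    intro t htR hmu
    by_cases hp : t ∈ pres
    · exact pvOkA_of_mem_pres rn pres 1 t hp
    · obtain ⟨hsome, hacy⟩ := hpre t htR hp
      obtain ⟨cs, hcs⟩ := Option.isSome_iff_exists.mp hsome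
      rw [pvOkA_succ_true_iff]
      refine Or.inr ⟨cs, hcs, ?_⟩
      intro c hc
      have hcsucc : c ∈ pvSuccs rn pres t := by
        unfold pvSuccs; rw [if_neg hp, hcs]; simpa using hc
      have hlt := pv_mu_lt rn pres t c hp hcsucc hacy
      by_cases hcp : c ∈ pres
      · simp [pvOkA, hcp]
      · exfalso
        have := pv_mu_pos rn pres c hcp
        have := pv_mu_pos rn pres t hp
        omega
  | succ f ih =>
    intro t htR hmu
    by_cases hp : t ∈ pres
    · exact pvOkA_of_mem_pres rn pres _ t hp
    · obtain ⟨hsome, hacy⟩ := hpre t htR hp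
      obtain ⟨cs, hcs⟩ := Option.isSome_iff_exists.mp hsome
      rw [pvOkA_succ_true_iff]
      refine Or.inr ⟨cs, hcs, ?_⟩
      intro c hc
      have hcsucc : c ∈ pvSuccs rn pres t := by
        unfold pvSuccs; rw [if_neg hp, hcs]; simpa using hc
      have hlt := pv_mu_lt rn pres t c hp hcsucc hacy
      exact ih c (hRc t htR c hcsucc) (by omega)

theorem pv_le_foldl_max (f : (Int × List (String × List Int)) → Nat) :
    ∀ (l : List (Int × List (String × List Int))) (init a : Nat), a ≤ init →
      a ≤ l.foldl (fun m p => max m (f p)) init := by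
  intro l
  induction l with
  | nil => intro init a h; simpa using h
  | cons p l ih =>
    intro init a h
    simp only [List.foldl_cons]
    exact ih (max init (f p)) a (le_trans h (le_max_left _ _))

theorem pv_mem_le_foldl_max (f : (Int × List (String × List Int)) → Nat) :
    ∀ (l : List (Int × List (String × List Int))) (init : Nat) (p : (Int × List (String × List Int))),
      p ∈ l → f p ≤ l.foldl (fun m q => max m (f q)) init := by
  intro l
  induction l with
  | nil => intro init p h; simp at h
  | cons q l ih =>
    intro init p h
    simp only [List.mem_cons] at h
    simp only [List.foldl_cons]
    rcases h with h | h
    · subst h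
      exact pv_le_foldl_max f l _ _ (le_max_right _ _)
    · exact ih _ p h

theorem pv_branch_le (rn : List (Int × List (String × List Int))) :
    ∀ p ∈ rn, ((List.lookup "orderedChildTaxonIds" p.2).getD []).length ≤ pvMaxBranch rn := by
  intro p h
  unfold pvMaxBranch
  exact pv_mem_le_foldl_max
    (fun q => ((List.lookup "orderedChildTaxonIds" q.2).getD []).length) rn 0 p h

theorem pv_sum_map_le {α : Type} : ∀ (l : List α) (g : α → Nat) (B : Nat),
    (∀ x ∈ l, g x ≤ B) → (l.map g).sum ≤ l.length * B := by
  intro l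
  induction l with
  | nil => simp
  | cons a l ih =>
    intro g B h
    simp only [List.map_cons, List.sum_cons, List.length_cons, Nat.succ_mul]
    have h1 := h a (List.mem_cons_self ..)
    have h2 := ih g B (fun x hx => h x (List.mem_cons_of_mem _ hx))
    omega

theorem pvCostA_le (rn : List (Int × List (String × List Int))) (pres : List Int) :
    ∀ f t, pvCostA rn pres f t ≤ (pvMaxBranch rn + 1) ^ f := by
  intro f
  induction f with
  | zero => intro t; simp [pvCostA_zero]
  | succ f ih =>
    intro t
    have hpow1 : 1 ≤ (pvMaxBranch rn + 1) ^ f := Nat.one_le_pow _ _ (by omega)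
    have hpows : (pvMaxBranch rn + 1) ^ (f + 1)
        = (pvMaxBranch rn + 1) ^ f + pvMaxBranch rn * (pvMaxBranch rn + 1) ^ f := by
      rw [pow_succ]; ring
    by_cases hp : t ∈ pres
    · rw [pvCostA_succ_pres rn pres f t hp]; omega
    · cases hch : pvChildList rn t with
      | none => rw [pvCostA_succ_none rn pres f t hp hch]; omega
      | some cs =>
        rw [pvCostA_succ_some rn pres f t cs hp hch]
        have hlen : cs.length ≤ pvMaxBranch rn := by
          unfold pvChildList at hch
          cases hlk : List.lookup t rn with
          | none => rw [hlk] at hch; cases hch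
          | some d =>
            rw [hlk] at hch
            have hmem := pv_lookup_mem rn t d hlk
            have := pv_branch_le rn (t, d) hmem
            simpa [hch] using this
        have hsum : (cs.map (pvCostA rn pres f)).sum ≤ cs.length * (pvMaxBranch rn + 1) ^ f :=
          pv_sum_map_le cs _ _ (fun c _ => ih c)
        have hmul : cs.length * (pvMaxBranch rn + 1) ^ f ≤ pvMaxBranch rn * (pvMaxBranch rn + 1) ^ f :=
          Nat.mul_le_mul_right _ hlen
        omega

-- the stack loop consumes a block of ok nodes into the preorder flatten of A's recursion
theorem pv_stack_run (rn : List (Int × List (String × List Int))) (pres : List Int) :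
    ∀ f cs, ∀ stk acc g,
      (∀ c ∈ cs, pvOkA rn pres f c = true) →
      (cs.map (pvCostA rn pres f)).sum ≤ g →
      pvLoopB rn pres g (cs ++ stk) acc =
        pvLoopB rn pres (g - (cs.map (pvCostA rn pres f)).sum) stk
          (acc ++ cs.flatMap (pvFpdA rn pres f)) := by
  intro f
  induction f with
  | zero =>
    intro cs
    induction cs with
    | nil => intro stk acc g _ _; simp
    | cons c cs ihc =>
      intro stk acc g hok hcost
      have hc : c ∈ pres := by
        have := hok c (List.mem_cons_self ..)
        simpa [pvOkA] using this
      simp only [List.map_cons, List.sum_cons, pvCostA_zero] at hcost ⊢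
      obtain ⟨g', rfl⟩ : ∃ g', g = g' + 1 := ⟨g - 1, by omega⟩
      rw [List.cons_append, pvLoopB_succ_pres rn pres g' c _ acc hc]
      rw [ihc stk (acc ++ [c]) g' (fun x hx => hok x (List.mem_cons_of_mem _ hx)) (by omega)]
      rw [List.flatMap_cons, pvFpdA_pres rn pres 0 c hc]
      congr 1
      · omega
      · simp
  | succ f ihf =>
    intro cs
    induction cs with
    | nil => intro stk acc g _ _; simp
    | cons c cs ihc =>
      intro stk acc g hok hcost
      have hokc := hok c (List.mem_cons_self ..)
      by_cases hc : c ∈ pres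
      · simp only [List.map_cons, List.sum_cons, pvCostA_succ_pres rn pres f c hc] at hcost ⊢
        obtain ⟨g', rfl⟩ : ∃ g', g = g' + 1 := ⟨g - 1, by omega⟩
        rw [List.cons_append, pvLoopB_succ_pres rn pres g' c _ acc hc]
        rw [ihc stk (acc ++ [c]) g' (fun x hx => hok x (List.mem_cons_of_mem _ hx)) (by omega)]
        rw [List.flatMap_cons, pvFpdA_pres rn pres (f + 1) c hc]
        congr 1
        · omega
        · simp
      · rw [pvOkA_succ_true_iff] at hokc
        rcases hokc with hokc | ⟨ds, hch, hds⟩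
        · exact absurd hokc hc
        simp only [List.map_cons, List.sum_cons,
          pvCostA_succ_some rn pres f c ds hc hch] at hcost ⊢
        obtain ⟨g', rfl⟩ : ∃ g', g = g' + 1 := ⟨g - 1, by omega⟩
        rw [List.cons_append, pvLoopB_succ_not rn pres g' c _ acc hc, hch]
        simp only [Option.getD_some]
        rw [ihf ds (cs ++ stk) acc g' hds (by omega)]
        rw [ihc stk (acc ++ ds.flatMap (pvFpdA rn pres f))
          (g' - (ds.map (pvCostA rn pres f)).sum)
          (fun x hx => hok x (List.mem_cons_of_mem _ hx)) (by omega)]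
        rw [List.flatMap_cons, pvFpdA_succ_some rn pres f c ds hc hch]
        congr 1
        · omega
        · simp

-- the non-preserved nodes A visits are all keys of raw_nodes, so the measure at the root is
-- at most raw_nodes.length
theorem pv_mu_le (rn : List (Int × List (String × List Int))) (pres : List Int) (t : Int)
    (hpre : ∀ n ∈ pvReach rn pres [t], n ∉ pres → (pvChildList rn n).isSome = true) :
    pvMu rn pres t ≤ rn.length := by
  unfold pvMu
  rw [List.countP_eq_length_filter]
  have hnd : ((pvReach rn pres [t]).filter (fun n => decide (n ∉ pres))).Nodup :=
    (pv_nodup_clos rn pres _ [t] (List.nodup_singleton t)).filter _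
  have hsub : ((pvReach rn pres [t]).filter (fun n => decide (n ∉ pres))) ⊆ rn.map Prod.fst := by
    intro n hn
    rw [List.mem_filter] at hn
    have hnp : n ∉ pres := by simpa using hn.2
    have hsome := hpre n hn.1 hnp
    unfold pvChildList at hsome
    cases hlk : List.lookup n rn with
    | none => rw [hlk] at hsome; simp at hsome
    | some d =>
      have := pv_lookup_mem rn n d hlk
      exact List.mem_map.mpr ⟨(n, d), this, rfl⟩
  calc ((pvReach rn pres [t]).filter (fun n => decide (n ∉ pres))).length
      ≤ (rn.map Prod.fst).length := pv_nodup_subset_length hnd hsub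
    _ = rn.length := List.length_map ..

-- ===== VERDICT (by name: the statement is the Claim_ definition above) =====
theorem first_preserved_descendants_py_spec : Claim_equal_first_preserved_descendants_py := by
  intro rn t pres _hdom hpre
  show _ = first_preserved_descendants_py_alt rn t pres
  unfold first_preserved_descendants_py first_preserved_descendants_py_alt
  have hok : pvOkA rn pres (rn.length + 1) t = true := by
    rcases hpre with hp | hpre
    · exact pvOkA_of_mem_pres rn pres _ t hp
    · apply pvOkA_of_pre rn pres (pvReach rn pres [t])
        (pv_reach_closed rn pres [t] (List.nodup_singleton t)) hpre rn.length t
        (pv_seed_subset_reach rn pres [t] (List.mem_singleton_self t))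
      have := pv_mu_le rn pres t (fun n hn hnp => (hpre n hn hnp).1)
      omega
  have hcost : ([t].map (pvCostA rn pres (rn.length + 1))).sum ≤ (pvMaxBranch rn + 1) ^ (rn.length + 1) := by
    simp only [List.map_cons, List.map_nil, List.sum_cons, List.sum_nil, Nat.add_zero]
    exact pvCostA_le rn pres _ t
  have hmain := pv_stack_run rn pres (rn.length + 1) [t] [] []
    ((pvMaxBranch rn + 1) ^ (rn.length + 1))
    (by intro c hc; simp at hc; subst hc; exact hok) hcost
  simp only [List.append_nil, List.nil_append] at hmain
  rw [hmain, pvLoopB_nil]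
  simp
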